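-- pv_equiv track=rewrite | github.com/dawidsielski/Python-learning | exercises/check.py | solution
-- ===== SOURCE A (Python) =====
-- def solution(X):
--     result = [0 for x in range(X)]
--     for i in range(1,X + 1):
--         for dwarf_number in range(1, X + 1):
--             x = i * dwarf_number
--             if x > X:
--                 break
--             if result[x - 1] == 0:
--                 result[x - 1] = 1
--             else:
--                 result[x - 1] = 0
--     return result
-- ===== SOURCE B (Python) =====
-- def solution(X):
--     result = [0] * X
--     k = 1
--     while k * k <= X:
--         result[k * k - 1] = 1
--         k += 1
--     return result
-- ===== Notes on version B (the rewrite author's own statement) =====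
-- stated objective: faster
-- what changed: A toggles every multiple of every i (the locker-problem sieve, Theta(X log X) toggles); B uses the fact that a cell ends at 1 iff its 1-based index has an odd number of divisors, i.e. is a perfect square, and directly writes 1 at the sqrt(X) square positions of a zero list.
import Mathlib
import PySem

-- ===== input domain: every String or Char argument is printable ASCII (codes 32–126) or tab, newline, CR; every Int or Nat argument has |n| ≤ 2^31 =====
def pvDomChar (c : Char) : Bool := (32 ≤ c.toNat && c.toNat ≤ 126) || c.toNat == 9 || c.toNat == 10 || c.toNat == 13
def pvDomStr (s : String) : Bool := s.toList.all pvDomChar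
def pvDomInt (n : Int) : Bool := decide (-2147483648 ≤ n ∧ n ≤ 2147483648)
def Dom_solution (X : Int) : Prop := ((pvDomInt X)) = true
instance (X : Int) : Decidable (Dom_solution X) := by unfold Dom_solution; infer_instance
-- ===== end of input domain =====

-- B replaces A's O(X log X) multiple-toggling sieve by directly writing 1 at the
-- perfect-square positions of a zero list (the toggled cells that end at 1).

-- ===== PORT A =====
-- inner `for dwarf_number in range(1, X+1)` with its `break`; the index x-1 is always
-- in range during A's execution (1 ≤ x ≤ X = len(result)), so pyGetD/pySetD are exact.
def solInner (X i : Int) (ds : List Int) (res : List Int) : List Int :=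
  match ds with
  | [] => res
  | d :: ds' =>
    let x := i * d
    if x > X then res
    else solInner X i ds'
      (PySem.List.pySetD res (x - 1) (if PySem.List.pyGetD res (x - 1) 0 = 0 then 1 else 0))

def solution (X : Int) : List Int :=
  let result := (PySem.List.pyRange 0 X 1).map (fun _ => (0 : Int))
  (PySem.List.pyRange 1 (X + 1) 1).foldl
    (fun res i => solInner X i (PySem.List.pyRange 1 (X + 1) 1) res) result

-- ===== PORT B =====
-- the `while k * k <= X` loop of Source B; the `1 ≤ k` conjunct only makes the recursion
-- total (k starts at 1 and only increases).
def altGo (X k : Int) (res : List Int) : List Int :=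
  if h : 1 ≤ k ∧ k * k ≤ X then
    altGo X (k + 1) (PySem.List.pySetD res (k * k - 1) 1)
  else res
termination_by (X + 1 - k).toNat
decreasing_by
  have hk : k ≤ k * k := le_mul_of_one_le_left (by omega) h.1
  omega

def solution_alt (X : Int) : List Int :=
  altGo X 1 (List.replicate X.toNat 0)   -- [0] * X  (empty for X ≤ 0)

-- ===== PRECONDITION & SPEC =====
def Spec_solution (X : Int) (out : List Int) : Prop := out = solution_alt X
instance (X : Int) (out : List Int) : Decidable (Spec_solution X out) := by unfold Spec_solution; infer_instance

-- ===== CLAIM (what is proved, stated in full; the proofs are below) =====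
def Claim_equal_solution : Prop := ∀ (X : Int), Dom_solution X → Spec_solution X (solution X)

-- ===== LEMMAS AND PROOFS =====

-- the toggle A performs on the (1-based) cell v, and the flip function it realises
def tog (x : Int) : Int := if x = 0 then 1 else 0

def togAt (res : List Int) (v : Int) : List Int :=
  PySem.List.pySetD res (v - 1) (if PySem.List.pyGetD res (v - 1) 0 = 0 then 1 else 0)

-- all cells A toggles, flattened (i-th block: the multiples of i up to X)
def togList (X : Int) : List Int :=
  (PySem.List.pyRange 1 (X + 1) 1).flatMap
    (fun i => (PySem.List.pyRange 1 (PySem.Int.floordiv X i + 1) 1).map (fun d => i * d))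

theorem length_togAt (res : List Int) (v : Int) : (togAt res v).length = res.length := by
  simp [togAt, PySem.List.length_pySetD]

theorem getElem_togAt (res : List Int) (v : Int) (hv : 1 ≤ v) (hvl : v ≤ (res.length : Int))
    (j : Nat) (hj : j < res.length) :
    (togAt res v)[j]'(by rw [length_togAt]; exact hj) =
      if (j : Int) = v - 1 then tog res[j] else res[j] := by
  have h0 : (0:Int) ≤ v - 1 := by omega
  have hlt : v - 1 < (res.length : Int) := by omega
  unfold togAt
  simp only [PySem.List.pySetD_of_nonneg res _ h0,
      PySem.List.pyGetD_eq_getElem res _ h0 hlt]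
  simp only [List.getElem_set]
  have : (v-1).toNat = j ↔ (j:Int) = v - 1 := by omega
  split_ifs with h1 h2 h2 <;> simp_all [tog]

theorem length_foldl_togAt (ns : List Int) (res : List Int) :
    (ns.foldl togAt res).length = res.length := by
  induction ns generalizing res with
  | nil => rfl
  | cons n ns ih => simp [List.foldl_cons, ih, length_togAt]

theorem getElem_foldl_togAt (ns : List Int) (res : List Int)
    (hns : ∀ v ∈ ns, 1 ≤ v ∧ v ≤ (res.length : Int)) (j : Nat) (hj : j < res.length) :
    (ns.foldl togAt res)[j]'(by rw [length_foldl_togAt]; exact hj) =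
      tog^[ns.count ((j : Int) + 1)] res[j] := by
  induction ns generalizing res with
  | nil => simp
  | cons n ns ih =>
    have hn := hns n List.mem_cons_self
    have hlen : (togAt res n).length = res.length := length_togAt res n
    have h1 := ih (togAt res n) (fun v hv => by rw [hlen]; exact hns v (List.mem_cons_of_mem n hv)) (by omega)
    simp only [List.foldl_cons, List.count_cons]
    have h2 := getElem_togAt res n hn.1 hn.2 j hj
    by_cases hc : ((j:Int) = n - 1)
    · have hb : (n == (j:Int) + 1) = true := by simp; omega
      simp only [hb, if_true]
      rw [h1, h2, if_pos hc, ← Function.iterate_succ_apply]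
    · have hb : (n == (j:Int) + 1) = false := by simp; omega
      simp only [hb, Bool.false_eq_true, if_false, add_zero]
      rw [h1, h2, if_neg hc]

theorem tog_iterate_zero (c : Nat) : tog^[c] 0 = if c % 2 = 1 then 1 else 0 := by
  induction c with
  | zero => rfl
  | succ c ih =>
    rw [Function.iterate_succ_apply', ih]
    rcases Nat.even_or_odd c with h | h <;> simp [Nat.even_iff, Nat.odd_iff] at h <;>
      simp [tog, h, Nat.succ_mod_two_eq_one_iff]

theorem solInner_eq_aux (X i : Int) (hi : 1 ≤ i) (hq : PySem.Int.floordiv X i ≤ X) :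
    ∀ (n : Nat) (a : Int) (res : List Int), 1 ≤ a → (X + 1 - a).toNat = n →
    solInner X i (PySem.List.pyRange a (X + 1) 1) res =
      ((PySem.List.pyRange a (PySem.Int.floordiv X i + 1) 1).map (fun d => i * d)).foldl togAt res := by
  intro n
  induction n with
  | zero =>
    intro a res ha h0
    rw [PySem.List.pyRange_one_eq_nil (by omega), PySem.List.pyRange_one_eq_nil (by omega)]
    rfl
  | succ n ih =>
    intro a res ha h0
    rw [PySem.List.pyRange_one_cons (show a < X + 1 by omega)]
    by_cases hbreak : i * a > X
    · have h1 : ¬ (a ≤ PySem.Int.floordiv X i) := by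
        rw [PySem.Int.le_floordiv_iff_mul_le (by omega)]
        rw [mul_comm]; omega
      simp only [solInner, if_pos hbreak]
      rw [PySem.List.pyRange_one_eq_nil (show PySem.Int.floordiv X i + 1 ≤ a by omega)]
      rfl
    · have hle : a ≤ PySem.Int.floordiv X i := by
        rw [PySem.Int.le_floordiv_iff_mul_le (by omega)]
        rw [mul_comm]; omega
      rw [PySem.List.pyRange_one_cons (show a < PySem.Int.floordiv X i + 1 by omega),
        List.map_cons, List.foldl_cons]
      simp only [solInner, if_neg hbreak]
      exact ih (a + 1) _ (by omega) (by omega)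

theorem floordiv_le_self (X i : Int) (hi : 1 ≤ i) (hX : 1 ≤ X) : PySem.Int.floordiv X i ≤ X := by
  have h2 : (PySem.Int.floordiv X i) * i ≤ X := (PySem.Int.le_floordiv_iff_mul_le (by omega)).mp le_rfl
  by_cases h : 0 ≤ PySem.Int.floordiv X i
  · nlinarith
  · omega

theorem solution_eq_foldl (X : Int) :
    solution X = (togList X).foldl togAt (List.replicate X.toNat 0) := by
  unfold solution togList
  rw [show (PySem.List.pyRange 0 X 1).map (fun _ => (0:Int)) = List.replicate X.toNat 0 by
    rw [List.map_const', PySem.List.length_pyRange_one]; norm_num]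
  rw [List.foldl_flatMap]
  show List.foldl _ (List.replicate X.toNat 0) _ = _
  apply PySem.List.foldl_congr_mem
  intro acc i hi
  rw [PySem.List.mem_pyRange_one] at hi
  exact solInner_eq_aux X i hi.1 (floordiv_le_self X i hi.1 (by omega)) _ 1 acc (by omega) rfl

theorem count_flatMap_eq_countP {α : Type} (v : Int) (f : α → List Int) (p : α → Bool)
    (l : List α) (hl : ∀ i ∈ l, (f i).count v = if p i then 1 else 0) :
    (l.flatMap f).count v = l.countP p := by
  induction l with
  | nil => rfl
  | cons x l ih =>
    rw [List.flatMap_cons, List.count_append, List.countP_cons,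
      hl x List.mem_cons_self, ih (fun i hi => hl i (List.mem_cons_of_mem x hi))]
    split_ifs <;> omega

theorem count_inner (X v i : Int) (hi : 1 ≤ i) (h1 : 1 ≤ v) (h2 : v ≤ X) :
    ((PySem.List.pyRange 1 (PySem.Int.floordiv X i + 1) 1).map (fun d => i * d)).count v =
      if i ∣ v then 1 else 0 := by
  by_cases hdvd : i ∣ v
  · obtain ⟨e, he⟩ := hdvd
    have he1 : 1 ≤ e := by nlinarith
    have heq : e ≤ PySem.Int.floordiv X i := by
      rw [PySem.Int.le_floordiv_iff_mul_le (by omega)]; nlinarith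
    rw [if_pos ⟨e, he⟩]
    unfold List.count
    rw [List.countP_map]
    have hcongr : ∀ d ∈ PySem.List.pyRange 1 (PySem.Int.floordiv X i + 1) 1,
        (((fun x => x == v) ∘ (fun d => i * d)) d = true ↔ (d == e) = true) := by
      intro d _
      simp only [Function.comp_apply, he]
      have : (i * d = i * e) ↔ (d = e) := mul_right_inj' (by omega)
      by_cases hde : d = e
      · simp [hde]
      · have : ¬ (i * d = i * e) := fun hc => hde (this.mp hc)
        simp [hde, this]
    rw [List.countP_congr hcongr]  -- countP (· == e)
    have : (PySem.List.pyRange 1 (PySem.Int.floordiv X i + 1) 1).count e = 1 :=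
      List.count_eq_one_of_mem (PySem.List.nodup_pyRange_one _ _)
        (PySem.List.mem_pyRange_one.mpr ⟨by omega, by omega⟩)
    exact this
  · rw [if_neg hdvd, List.count_eq_zero]
    intro hmem
    obtain ⟨d, hd, hde⟩ := List.mem_map.mp hmem
    exact hdvd ⟨d, hde.symm⟩

theorem count_togList (X v : Int) (h1 : 1 ≤ v) (h2 : v ≤ X) :
    (togList X).count v =
      (PySem.List.pyRange 1 (v + 1) 1).countP (fun d => decide (d ∣ v)) := by
  unfold togList
  rw [count_flatMap_eq_countP v _ (fun i => decide (i ∣ v)) _ ?inner]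
  case inner =>
    intro i hi
    rw [PySem.List.mem_pyRange_one] at hi
    rw [count_inner X v i hi.1 h1 h2]
    split_ifs with h <;> simp_all
  rw [PySem.List.pyRange_one_append 1 (v + 1) (X + 1) (by omega) (by omega), List.countP_append]
  have hz : (PySem.List.pyRange (v + 1) (X + 1) 1).countP (fun i => decide (i ∣ v)) = 0 := by
    rw [List.countP_eq_zero]
    intro i hi
    rw [PySem.List.mem_pyRange_one] at hi
    simp only [decide_eq_true_eq]
    intro hdvd
    have := Int.le_of_dvd (by omega) hdvd
    omega
  omega

theorem sq_unique (d r v : Int) (hd : 1 ≤ d) (hr : 1 ≤ r) (h1 : d * d = v) (h2 : r * r = v) :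
    d = r := by
  have h3 : (d - r) * (d + r) = 0 := by nlinarith
  rcases mul_eq_zero.mp h3 with h | h <;> omega

theorem even_card_u (v : Int) (hv : 1 ≤ v) (u : Finset Int)
    (hu : ∀ a, a ∈ u ↔ 1 ≤ a ∧ a ≤ v ∧ a ∣ v ∧ a * a ≠ v) : Even u.card := by
  have key : ∀ a ∈ u, (1 ≤ v / a ∧ v / a ≤ v ∧ v / a ∣ v ∧ (v / a) * (v / a) ≠ v) ∧
      v / (v / a) = a ∧ v / a ≠ a := by
    intro a ha
    obtain ⟨ha1, ha2, hdvd, hne⟩ := (hu a).mp ha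
    have hb : a * (v / a) = v := Int.mul_ediv_cancel' hdvd
    set b := v / a with hbdef
    have hb1 : 1 ≤ b := by nlinarith
    have hb2 : b ≤ v := by nlinarith
    have hbd : b ∣ v := ⟨a, by rw [mul_comm] at hb; omega⟩
    have hbne : b * b ≠ v := by
      intro hc
      have : (a - b) * b = 0 := by nlinarith
      rcases mul_eq_zero.mp this with h | h
      · exact hne (by nlinarith)
      · omega
    have hgg : v / b = a := by
      have : b * a = v := by rw [mul_comm]; exact hb
      rw [← this, Int.mul_ediv_cancel_left a (by omega)]
    have hga : b ≠ a := fun hc => hne (by nlinarith)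
    exact ⟨⟨hb1, hb2, hbd, hbne⟩, hgg, hga⟩
  have hsum : ∑ _x ∈ u, (1 : ZMod 2) = 0 := by
    apply Finset.sum_involution (fun a _ => v / a)
    · intro a ha; decide
    · intro a ha _; exact (key a ha).2.2
    · intro a ha; exact (hu _).mpr (key a ha).1
    · intro a ha; exact (key a ha).2.1
  rw [Finset.sum_const, nsmul_eq_mul, mul_one] at hsum
  exact ZMod.natCast_eq_zero_iff_even.mp hsum

theorem countP_dvd_odd_iff (v : Int) (hv : 1 ≤ v) :
    ((PySem.List.pyRange 1 (v + 1) 1).countP (fun d => decide (d ∣ v))) % 2 = 1 ↔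
      ∃ r : Int, 1 ≤ r ∧ r * r = v := by
  rw [List.countP_eq_length_filter]
  set l := (PySem.List.pyRange 1 (v + 1) 1).filter (fun d => decide (d ∣ v)) with hl
  have hnd : l.Nodup := List.Nodup.filter _ (PySem.List.nodup_pyRange_one _ _)
  rw [← List.toFinset_card_of_nodup hnd]
  set s := l.toFinset with hs
  have hmem : ∀ d, d ∈ s ↔ 1 ≤ d ∧ d ≤ v ∧ d ∣ v := by
    intro d
    simp only [hs, hl, List.mem_toFinset, List.mem_filter, PySem.List.mem_pyRange_one,
      decide_eq_true_eq]
    omega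
  have hsplit := Finset.card_filter_add_card_filter_not (fun d => d * d = v) (s := s)
  have heven : Even (s.filter (fun d => ¬ d * d = v)).card := by
    apply even_card_u v hv
    intro a
    simp only [Finset.mem_filter, hmem]
    tauto
  obtain ⟨c, hc⟩ := heven
  by_cases hsq : ∃ r : Int, 1 ≤ r ∧ r * r = v
  · have hcard : (s.filter (fun d => d * d = v)).card = 1 := by
      obtain ⟨r, hr1, hr2⟩ := hsq
      have : s.filter (fun d => d * d = v) = {r} := by
        apply Finset.ext
        intro d
        simp only [Finset.mem_filter, Finset.mem_singleton, hmem]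
        constructor
        · rintro ⟨_, hd⟩; exact sq_unique d r v (by omega) hr1 hd hr2
        · rintro rfl
          exact ⟨⟨hr1, by nlinarith, ⟨d, hr2.symm⟩⟩, hr2⟩
      rw [this, Finset.card_singleton]
    simp only [hsq, iff_true]
    omega
  · have hcard : (s.filter (fun d => d * d = v)).card = 0 := by
      rw [Finset.card_eq_zero, Finset.filter_eq_empty_iff]
      intro d hd hsq'
      exact hsq ⟨d, ((hmem d).mp hd).1, hsq'⟩
    simp only [hsq, iff_false]
    omega

theorem length_altGo (X k : Int) (res : List Int) : (altGo X k res).length = res.length := by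
  induction k, res using altGo.induct X with
  | case1 k res h ih => rw [altGo, dif_pos h, ih, PySem.List.length_pySetD]
  | case2 k res h => rw [altGo, dif_neg h]

theorem altGo_get (X : Int) (k : Int) (res : List Int) :
    1 ≤ k → X ≤ (res.length : Int) → ∀ j : Nat, ∀ hj : j < res.length,
    ((∃ m : Int, k ≤ m ∧ m * m ≤ X ∧ m * m = (j : Int) + 1) →
        (altGo X k res)[j]'(length_altGo X k res ▸ hj) = 1) ∧
    ((¬ ∃ m : Int, k ≤ m ∧ m * m ≤ X ∧ m * m = (j : Int) + 1) →
        (altGo X k res)[j]'(length_altGo X k res ▸ hj) = res[j]) := by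
  induction k, res using altGo.induct X with
  | case1 k res h ih =>
    intro hk hX j hj
    have hlen : (PySem.List.pySetD res (k * k - 1) 1).length = res.length := PySem.List.length_pySetD _ _ _
    have hih := ih (by omega) (by omega) j (by omega)
    have h0 : (0:Int) ≤ k * k - 1 := by nlinarith [h.1]
    have hset : (PySem.List.pySetD res (k * k - 1) 1)[j]'(by omega) =
        if (j : Int) = k * k - 1 then 1 else res[j] := by
      simp only [PySem.List.pySetD_of_nonneg res _ h0, List.getElem_set]
      split_ifs <;> simp_all <;> omega
    have hout : ∀ (hx : j < (altGo X k res).length),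
        (altGo X k res)[j]'hx = (altGo X (k+1) (PySem.List.pySetD res (k * k - 1) 1))[j]'(by
          rw [length_altGo, hlen]; exact hj) := by
      intro hx
      congr 1
      rw [altGo, dif_pos h]
    constructor
    · rintro ⟨m, hm1, hm2, hm3⟩
      rw [hout]
      by_cases hm : m = k
      · subst hm
        have hnone : ¬ ∃ m', m + 1 ≤ m' ∧ m' * m' ≤ X ∧ m' * m' = (j : Int) + 1 := by
          rintro ⟨m', hm'1, hm'2, hm'3⟩
          have : m * m < m' * m' := by nlinarith
          omega
        rw [hih.2 hnone, hset, if_pos (by omega)]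
      · exact hih.1 ⟨m, by omega, hm2, hm3⟩
    · intro hno
      have hno' : ¬ ∃ m', k + 1 ≤ m' ∧ m' * m' ≤ X ∧ m' * m' = (j : Int) + 1 := by
        rintro ⟨m', a, b, c⟩
        exact hno ⟨m', by omega, b, c⟩
      rw [hout, hih.2 hno', hset, if_neg (fun hjk => hno ⟨k, le_refl k, h.2, by omega⟩)]
  | case2 k res h =>
    intro hk hX j hj
    have hempty : ¬ ∃ m : Int, k ≤ m ∧ m * m ≤ X ∧ m * m = (j : Int) + 1 := by
      rintro ⟨m, hm1, hm2, _⟩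
      have h1 : k * k ≤ m * m := by nlinarith
      exact h ⟨hk, by omega⟩
    have hout : ∀ (hx : j < (altGo X k res).length), (altGo X k res)[j]'hx = res[j] := by
      intro hx
      congr 1
      rw [altGo, dif_neg h]
    exact ⟨fun hex => absurd hex hempty, fun _ => hout _⟩

theorem solution_eq_alt (X : Int) : solution X = altGo X 1 (List.replicate X.toNat 0) := by
  rw [solution_eq_foldl]
  have hlen : (List.replicate X.toNat (0:Int)).length = X.toNat := List.length_replicate
  apply List.ext_getElem
  · rw [length_foldl_togAt, length_altGo]
  · intro j h1 h2
    have hj : j < X.toNat := by rwa [length_foldl_togAt, hlen] at h1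
    have hX0 : 0 < X := by omega
    have hXn : ((X.toNat : Int)) = X := by omega
    have hjX : (j : Int) + 1 ≤ X := by omega
    have hns : ∀ v ∈ togList X, 1 ≤ v ∧ v ≤ ((List.replicate X.toNat (0:Int)).length : Int) := by
      intro v hv
      unfold togList at hv
      obtain ⟨i, hi, hv2⟩ := List.mem_flatMap.mp hv
      obtain ⟨d, hd, rfl⟩ := List.mem_map.mp hv2
      rw [PySem.List.mem_pyRange_one] at hi hd
      have hdq : d ≤ PySem.Int.floordiv X i := by omega
      have : d * i ≤ X := (PySem.Int.le_floordiv_iff_mul_le (by omega)).mp hdq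
      constructor
      · nlinarith
      · rw [hlen, hXn]; nlinarith
    have hA := getElem_foldl_togAt (togList X) _ hns j (by rwa [hlen])
    have hcnt : (togList X).count ((j:Int)+1) =
        (PySem.List.pyRange 1 ((j:Int) + 1 + 1) 1).countP (fun d => decide (d ∣ ((j:Int)+1))) :=
      count_togList X _ (by omega) hjX
    have hB := altGo_get X 1 (List.replicate X.toNat 0) (le_refl 1) (by rw [hlen, hXn]) j (by rwa [hlen])
    have hrep : (List.replicate X.toNat (0:Int))[j]'(by rwa [hlen]) = 0 := List.getElem_replicate _
    by_cases hsq : ∃ r : Int, 1 ≤ r ∧ r * r = (j:Int) + 1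
    · have hodd := (countP_dvd_odd_iff ((j:Int)+1) (by omega)).mpr hsq
      rw [hA, hrep, tog_iterate_zero, hcnt, if_pos hodd]
      obtain ⟨r, hr1, hr2⟩ := hsq
      exact (hB.1 ⟨r, hr1, by omega, hr2⟩).symm
    · have hodd : ¬ ((PySem.List.pyRange 1 ((j:Int) + 1 + 1) 1).countP
          (fun d => decide (d ∣ ((j:Int)+1)))) % 2 = 1 :=
        fun hc => hsq ((countP_dvd_odd_iff ((j:Int)+1) (by omega)).mp hc)
      rw [hA, hrep, tog_iterate_zero, hcnt, if_neg hodd]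
      have hno : ¬ ∃ m : Int, 1 ≤ m ∧ m * m ≤ X ∧ m * m = (j : Int) + 1 := by
        rintro ⟨m, a, b, c⟩
        exact hsq ⟨m, a, c⟩
      rw [hB.2 hno, hrep]

-- ===== VERDICT (by name: the statement is the Claim_ definition above) =====
theorem solution_spec : Claim_equal_solution := by
  intro X _
  unfold Spec_solution solution_alt
  exact solution_eq_alt X
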